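-- pv_equiv track=rewrite | github.com/KawshikManikantan/MEIRa_gradio | MEIRa/model/utils.py | action_sequences_to_clusters
-- ===== SOURCE A (Python) =====
-- from collections import defaultdict
--
-- def action_sequences_to_clusters(actions, mentions, num_major_entities):
--
--     cell_to_clusters = defaultdict(list)
--     for mention, (cell_idx, action_type) in zip(mentions, actions):
--         if action_type == "i":
--             continue
--         elif action_type == "o":
--             cell_to_clusters[num_major_entities].append(mention)
--         else:
--             cell_to_clusters[cell_idx].append(mention)
--
--     clusters = [[] for _ in range(num_major_entities + 1)]
--     for cell_idx, cluster in cell_to_clusters.items():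
--         clusters[cell_idx] = cluster
--
--     return clusters
-- ===== SOURCE B (Python) =====
-- def action_sequences_to_clusters(actions, mentions, num_major_entities):
--     pairs = list(zip(mentions, actions))
--     return [
--         [m for m, (c, t) in pairs
--          if t != "i" and (num_major_entities if t == "o" else c) == j]
--         for j in range(num_major_entities + 1)
--     ]
-- ===== Notes on version B (the rewrite author's own statement) =====
-- stated objective: alternative
-- what changed: Replaced A's mutation-based two-pass build (group into a defaultdict, then copy groups into a preallocated list) by an output-driven construction: for each slot j a stable filter comprehension collects exactly the mentions whose effective cell index is j, with no intermediate dict and no in-place updates.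
-- outside the precondition, e.g. on action_sequences_to_clusters([(-1, 'c')], [0], 2): A returns [[], [], [0]], B returns [[], [], []]
import Mathlib
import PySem

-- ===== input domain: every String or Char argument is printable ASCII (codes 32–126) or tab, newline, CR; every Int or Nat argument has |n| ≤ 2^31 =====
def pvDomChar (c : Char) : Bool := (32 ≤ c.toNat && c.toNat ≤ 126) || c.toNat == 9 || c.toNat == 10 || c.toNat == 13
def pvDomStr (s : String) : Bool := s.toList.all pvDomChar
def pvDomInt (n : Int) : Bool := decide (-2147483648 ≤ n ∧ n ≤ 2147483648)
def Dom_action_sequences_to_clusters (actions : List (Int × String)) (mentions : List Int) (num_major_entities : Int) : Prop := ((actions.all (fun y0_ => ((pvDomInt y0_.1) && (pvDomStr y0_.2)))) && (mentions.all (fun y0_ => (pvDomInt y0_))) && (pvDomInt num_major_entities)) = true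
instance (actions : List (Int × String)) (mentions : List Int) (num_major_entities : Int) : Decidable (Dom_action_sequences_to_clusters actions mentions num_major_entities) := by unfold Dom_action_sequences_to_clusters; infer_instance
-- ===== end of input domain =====

-- B replaces A's mutation-based two-pass build (group into a defaultdict, then copy the groups
-- into a preallocated list) by an output-driven construction: one stable filter per output slot;
-- same results, a genuinely different traversal (by output slot instead of by input position).

-- ===== PORT A =====
def action_sequences_to_clusters (actions : List (Int × String)) (mentions : List Int) (num_major_entities : Int) : List (List Int) :=
  -- cell_to_clusters = defaultdict(list); loop over zip(mentions, actions)
  let cell_to_clusters : PySem.Dict Int (List Int) :=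
    (mentions.zip actions).foldl
      (fun d p =>
        if p.2.2 = "i" then d
        else if p.2.2 = "o" then d.modify num_major_entities [] (· ++ [p.1])
        else d.modify p.2.1 [] (· ++ [p.1]))
      PySem.Dict.empty
  -- clusters = [[] for _ in range(num_major_entities + 1)]
  let clusters0 : List (List Int) :=
    (PySem.List.pyRange 0 (num_major_entities + 1) 1).map (fun _ => ([] : List Int))
  -- for cell_idx, cluster in cell_to_clusters.items(): clusters[cell_idx] = cluster
  -- (pySetD is the total form of the item assignment; Pre_ keeps every key in range)
  cell_to_clusters.items.foldl
    (fun cl kv => PySem.List.pySetD cl kv.1 kv.2) clusters0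

-- ===== PORT B =====
-- [[m for m,(c,t) in pairs if t != "i" and (n if t == "o" else c) == j] for j in range(n+1)]
def action_sequences_to_clusters_alt (actions : List (Int × String)) (mentions : List Int) (num_major_entities : Int) : List (List Int) :=
  (PySem.List.pyRange 0 (num_major_entities + 1) 1).map (fun j =>
    ((mentions.zip actions).filter
      (fun p => !(p.2.2 == "i") &&
        ((if p.2.2 = "o" then num_major_entities else p.2.1) == j))).map (·.1))

-- ===== PRECONDITION & SPEC =====
-- Pre_ excludes inputs where some kept (non-"i") action's effective cell index lies outside
-- [0, num_major_entities]: above Python's index range A raises IndexError (B returns the slots' filtered lists), and a negative in-range index hits Python's negative-index wraparound, whose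
-- resulting placement is an accident of A's materialization step.
def Pre_action_sequences_to_clusters (actions : List (Int × String)) (mentions : List Int) (num_major_entities : Int) : Prop :=
  ∀ p ∈ mentions.zip actions,
    p.2.2 = "i" ∨
    (p.2.2 = "o" ∧ 0 ≤ num_major_entities) ∨
    (p.2.2 ≠ "i" ∧ p.2.2 ≠ "o" ∧ 0 ≤ p.2.1 ∧ p.2.1 ≤ num_major_entities)
instance (actions : List (Int × String)) (mentions : List Int) (num_major_entities : Int) : Decidable (Pre_action_sequences_to_clusters actions mentions num_major_entities) := by unfold Pre_action_sequences_to_clusters; infer_instance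

def pvWitness_action_sequences_to_clusters : (List (Int × String)) × List Int × Int :=
  ([(0, "c"), (1, "o"), (2, "i")], [5, 6, 7], 1)

def Spec_action_sequences_to_clusters (actions : List (Int × String)) (mentions : List Int) (num_major_entities : Int) (out : List (List Int)) : Prop := out = action_sequences_to_clusters_alt actions mentions num_major_entities
instance (actions : List (Int × String)) (mentions : List Int) (num_major_entities : Int) (out : List (List Int)) : Decidable (Spec_action_sequences_to_clusters actions mentions num_major_entities out) := by unfold Spec_action_sequences_to_clusters; infer_instance

-- ===== CLAIM (what is proved, stated in full; the proofs are below) =====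
def Claim_equal_action_sequences_to_clusters : Prop := ∀ (actions : List (Int × String)) (mentions : List Int) (num_major_entities : Int), Dom_action_sequences_to_clusters actions mentions num_major_entities → Pre_action_sequences_to_clusters actions mentions num_major_entities → Spec_action_sequences_to_clusters actions mentions num_major_entities (action_sequences_to_clusters actions mentions num_major_entities)


-- ===== LEMMAS AND PROOFS =====

-- effective cell index of a kept zip pair p = (mention, (cell_idx, action_type))
def asEff (n : Int) (p : Int × (Int × String)) : Int := if p.2.2 = "o" then n else p.2.1

-- the mentions that land in slot j
def asSpec (n : Int) (pairs : List (Int × (Int × String))) (j : Int) : List Int :=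
  (pairs.filter (fun p => !(p.2.2 == "i") && (asEff n p == j))).map (·.1)

-- the kept pairs as (effective key, mention)
def asKept (n : Int) (pairs : List (Int × (Int × String))) : List (Int × Int) :=
  (pairs.filter (fun p => !(p.2.2 == "i"))).map (fun p => (asEff n p, p.1))

-- A's grouping loop is the uniform modify-append loop over asKept
lemma asDict_eq (n : Int) (pairs : List (Int × (Int × String))) (d : PySem.Dict Int (List Int)) :
    pairs.foldl
      (fun d p =>
        if p.2.2 = "i" then d
        else if p.2.2 = "o" then d.modify n [] (· ++ [p.1])
        else d.modify p.2.1 [] (· ++ [p.1])) d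
    = (asKept n pairs).foldl (fun d q => d.modify q.1 [] (· ++ [q.2])) d := by
  induction pairs generalizing d with
  | nil => rfl
  | cons p rest ih =>
    simp only [asKept, List.filter_cons, List.foldl_cons]
    by_cases hi : p.2.2 = "i"
    · simp [hi, ih, asKept]
    · by_cases ho : p.2.2 = "o" <;> simp [hi, ho, ih, asKept, asEff]

-- filtering asKept at key j is asSpec
lemma asKept_filter (n : Int) (pairs : List (Int × (Int × String))) (j : Int) :
    ((asKept n pairs).filter (fun q => q.1 == j)).map (·.2) = asSpec n pairs j := by
  simp only [asKept, asSpec, List.filter_map, List.map_map, List.filter_filter,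
    Function.comp_def]
  congr 1
  apply List.filter_congr
  intro p _
  exact Bool.and_comm _ _

-- Python-exact indexed update/lookup on nonnegative in-range indices
lemma pv_getD_setD (xs : List (List Int)) (i j : Int) (v d : List Int)
    (hi0 : 0 ≤ i) (hi : i < (xs.length : Int)) (hj0 : 0 ≤ j) :
    PySem.List.pyGetD (PySem.List.pySetD xs i v) j d
      = if j = i then v else PySem.List.pyGetD xs j d := by
  have h1 : i = ((i.toNat : Nat) : Int) := by omega
  have h2 : j = ((j.toNat : Nat) : Int) := by omega
  rw [h1, h2, PySem.List.pyGetD_pySetD_natCast xs i.toNat j.toNat v d (by omega)]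
  simp only [Int.natCast_inj]

-- materializing a nodup-keyed item list into cl: slot j gets the value at key j, if any
lemma asMat_len (its : List (Int × List Int)) (cl : List (List Int)) :
    (its.foldl (fun c q => PySem.List.pySetD c q.1 q.2) cl).length = cl.length := by
  induction its generalizing cl with
  | nil => rfl
  | cons q its ih => simp [ih, PySem.List.length_pySetD]

lemma asMat_get (its : List (Int × List Int)) (cl : List (List Int)) (j : Int)
    (hj0 : 0 ≤ j) (hj : j < (cl.length : Int))
    (hr : ∀ q ∈ its, 0 ≤ q.1 ∧ q.1 < (cl.length : Int))
    (hnd : (its.map (·.1)).Nodup) :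
    PySem.List.pyGetD (its.foldl (fun c q => PySem.List.pySetD c q.1 q.2) cl) j []
      = ((its.find? (fun q => q.1 == j)).map (·.2)).getD (PySem.List.pyGetD cl j []) := by
  induction its generalizing cl with
  | nil => simp
  | cons q its ih =>
    simp only [List.foldl_cons, List.map_cons, List.nodup_cons, List.mem_map] at *
    obtain ⟨hq, hnd'⟩ := hnd
    obtain ⟨hq0, hqlen⟩ := hr q (by simp)
    have hr' : ∀ r ∈ its, 0 ≤ r.1 ∧ r.1 < (cl.length : Int) := fun r hr2 => hr r (by simp [hr2])
    rw [ih (PySem.List.pySetD cl q.1 q.2) (by rw [PySem.List.length_pySetD]; omega)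
        (by intro r hr2; rw [PySem.List.length_pySetD]; exact hr' r hr2) hnd']
    by_cases hqj : q.1 = j
    · have hfind : its.find? (fun q => q.1 == j) = none := by
        rw [List.find?_eq_none]
        intro r hr2 hc
        exact hq ⟨r, hr2, by rw [beq_iff_eq.mp hc, hqj]⟩
      rw [List.find?_cons_of_pos (h := by simp [hqj]), hfind, hqj,
        pv_getD_setD cl j j q.2 [] hj0 (hqj ▸ hqlen) hj0]
      simp
    · rw [List.find?_cons_of_neg (h := by simp [hqj]),
        pv_getD_setD cl q.1 j q.2 [] hq0 hqlen hj0, if_neg (fun h => hqj h.symm)]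

-- ===== VERDICT (by name: the statement is the Claim_ definition above) =====
theorem action_sequences_to_clusters_spec : Claim_equal_action_sequences_to_clusters := by
  intro actions mentions n _ hpre
  unfold Spec_action_sequences_to_clusters
  unfold action_sequences_to_clusters action_sequences_to_clusters_alt
  simp only []
  set pairs := mentions.zip actions with hpairs
  set cl0 := (PySem.List.pyRange 0 (n + 1) 1).map (fun _ => ([] : List Int)) with hcl0
  set d := (asKept n pairs).foldl (fun d q => d.modify q.1 [] (· ++ [q.2]))
    (PySem.Dict.empty : PySem.Dict Int (List Int)) with hd
  rw [asDict_eq]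
  -- key bounds from Pre_
  have hkb : ∀ k ∈ (asKept n pairs).map (·.1), 0 ≤ k ∧ k ≤ n := by
    intro k hk
    obtain ⟨q, hq, rfl⟩ := List.mem_map.mp hk
    unfold asKept at hq
    obtain ⟨p, hp, rfl⟩ := List.mem_map.mp hq
    have hkeep : ¬ p.2.2 = "i" := by
      have := (List.mem_filter.mp hp).2
      simpa using this
    have hpmem : p ∈ pairs := (List.mem_filter.mp hp).1
    rcases hpre p hpmem with h | ⟨ho, hn⟩ | ⟨_, ho, hc0, hcn⟩
    · exact absurd h hkeep
    · simp [asEff, ho, hn]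
    · simp [asEff, ho, hc0, hcn]
  have hnd : d.keys.Nodup := by
    rw [hd]
    exact PySem.Dict.nodup_keys_foldl_modify_key (asKept n pairs)
      (fun q : Int × Int => q.1) []
      (fun (_ : PySem.Dict Int (List Int)) (q : Int × Int) (l : List Int) => l ++ [q.2]) _
      (by simp [PySem.Dict.keys_empty])
  have hkeys : d.keys = PySem.Set.ofList ((asKept n pairs).map (·.1)) := by
    rw [hd, PySem.Dict.keys_foldl_modify_key (asKept n pairs)
      (fun q : Int × Int => q.1) []
      (fun (_ : PySem.Dict Int (List Int)) (q : Int × Int) (l : List Int) => l ++ [q.2])]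
    simp [PySem.Dict.keys_empty, PySem.Set.update_nil_left]
  have hgetD : ∀ j : Int, d.getD j [] = asSpec n pairs j := by
    intro j
    rw [hd, PySem.Dict.getD_foldl_modify_append, PySem.Dict.getD_empty, asKept_filter]
    simp
  have hlen0 : cl0.length = (n + 1).toNat := by
    simp [hcl0, PySem.List.length_pyRange_one]
  -- item bounds
  have hitems : ∀ q ∈ d.items, 0 ≤ q.1 ∧ q.1 < (cl0.length : Int) := by
    intro q hq
    have hk : q.1 ∈ d.keys := PySem.Dict.mem_keys_of_mem_items d hq
    rw [hkeys] at hk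
    have hk2 := (PySem.Set.mem_ofList _ _).mp hk
    obtain ⟨h0, hn⟩ := hkb _ hk2
    refine ⟨h0, ?_⟩
    rw [hlen0]
    omega
  apply List.ext_getElem
  · rw [asMat_len]
    simp [hcl0, PySem.List.length_pyRange_one]
  · intro j hja hjb
    rw [asMat_len] at hja
    have hj : (j : Int) < (cl0.length : Int) := by exact_mod_cast hja
    have hj0 : (0 : Int) ≤ (j : Int) := by positivity
    have hcl0j : PySem.List.pyGetD cl0 (j : Int) [] = [] := by
      rw [hcl0]
      exact PySem.List.pyGetD_map_pyRange_of_nonneg _ (n + 1) _ _ hj0 (by rw [hlen0] at hj; omega)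
    have hA := asMat_get d.items cl0 (j : Int) hj0 hj hitems
      (by simpa [PySem.Dict.keys] using hnd)
    -- B side: element j of the comprehension is the slot-j filter, i.e. asSpec n pairs j
    have hjr : j < (PySem.List.pyRange 0 (n + 1) 1).length := by
      rw [PySem.List.length_pyRange_one]
      rw [hlen0] at hja
      omega
    have hB : ((PySem.List.pyRange 0 (n + 1) 1).map (fun j =>
        (pairs.filter (fun p => !(p.2.2 == "i") &&
          ((if p.2.2 = "o" then n else p.2.1) == j))).map (·.1)))[j]'hjb
        = asSpec n pairs (j : Int) := by
      rw [List.getElem_map, PySem.List.getElem_pyRange_one]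
      simp [asSpec, asEff]
    rw [hB]
    have hlift : ∀ (h : _ ),
        (d.items.foldl (fun c q => PySem.List.pySetD c q.1 q.2) cl0)[j]'h
          = PySem.List.pyGetD (d.items.foldl (fun c q => PySem.List.pySetD c q.1 q.2) cl0) (j : Int) [] := by
      intro h
      rw [PySem.List.pyGetD_eq_getElem _ [] hj0 (by rw [asMat_len]; exact hj)]
      simp
    rw [hlift, hA, hcl0j]
    -- bridge find? on items to getD
    rcases hfind : d.items.find? (fun q => q.1 == (j : Int)) with _ | q
    · have hnk : (j : Int) ∉ d.keys := by
        intro hk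
        rw [PySem.Dict.items_eq_map_keys d hnd []] at hfind
        rw [List.find?_eq_none] at hfind
        exact absurd (by simp) (hfind _ (List.mem_map.mpr ⟨_, hk, rfl⟩))
      have : d.getD (j : Int) [] = [] := by
        rw [PySem.Dict.getD_eq_get?_getD,
          (PySem.Dict.get?_eq_none_iff_not_mem_keys d _).mpr hnk]
        rfl
      rw [hfind]
      simp only [Option.map_none, Option.getD_none]
      rw [← hgetD (j : Int), this]
    · have hqmem := List.mem_of_find?_eq_some hfind
      have hqj : q.1 = (j : Int) := by
        have := List.find?_some hfind
        exact beq_iff_eq.mp this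
      have hget : d.get? (j : Int) = some q.2 := by
        apply PySem.Dict.get?_of_mem_items d (k := (j : Int)) (v := q.2) _ hnd
        rw [← hqj]
        exact hqmem
      have : d.getD (j : Int) [] = q.2 := by
        rw [PySem.Dict.getD_eq_get?_getD, hget]
        rfl
      rw [hfind]
      simp only [Option.map_some, Option.getD_some]
      rw [← hgetD (j : Int), this]
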